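-- pv_equiv track=rewrite | github.com/eulersformula/Lintcode-LeetCode | Bash_Game.py | can_win_bash
-- ===== SOURCE A (Python) =====
-- def can_win_bash(n: int) -> bool:
--     # Write your code here
--     if n <= 3:
--         return True
--     if n == 4:
--         return False
--     win_lose_arr = [True, True, False]
--     for _ in range(n - 4):
--         tmp = not (win_lose_arr[0] and win_lose_arr[1] and win_lose_arr[2])
--         win_lose_arr[0], win_lose_arr[1], win_lose_arr[2] = win_lose_arr[1], win_lose_arr[2], tmp
--     return win_lose_arr[-1]
-- ===== SOURCE B (Python) =====
-- def can_win_bash(n: int) -> bool: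
--     # Closed form: first player wins unless n is a positive multiple of 4.
--     return n <= 3 or n % 4 != 0
-- ===== Notes on version B (the rewrite author's own statement) =====
-- stated objective: faster
-- what changed: Replaced the O(n) three-cell DP loop with the closed form n <= 3 or n % 4 != 0.
import Mathlib
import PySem

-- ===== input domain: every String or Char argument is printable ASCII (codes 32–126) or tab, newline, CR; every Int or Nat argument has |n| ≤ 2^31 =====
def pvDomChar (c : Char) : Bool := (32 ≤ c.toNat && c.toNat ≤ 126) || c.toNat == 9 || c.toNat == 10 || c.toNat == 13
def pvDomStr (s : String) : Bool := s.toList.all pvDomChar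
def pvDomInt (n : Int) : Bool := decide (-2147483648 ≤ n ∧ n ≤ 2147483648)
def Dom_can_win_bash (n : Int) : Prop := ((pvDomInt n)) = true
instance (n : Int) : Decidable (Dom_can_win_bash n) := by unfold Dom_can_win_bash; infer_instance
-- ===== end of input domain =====

-- B replaces A's O(n) three-cell DP loop with the O(1) closed form n <= 3 or n % 4 != 0 (objective: faster).

-- ===== PORT A =====
-- the loop body: tmp = not (arr[0] and arr[1] and arr[2]); arr := (arr[1], arr[2], tmp)
def canWinBashStep (s : Bool × Bool × Bool) : Bool × Bool × Bool :=
  (s.2.1, s.2.2, !(s.1 && s.2.1 && s.2.2))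

-- 'for _ in range(n - 4)': iterate the body k = max(n-4, 0) times
def canWinBashLoop (k : Nat) (s : Bool × Bool × Bool) : Bool × Bool × Bool :=
  match k with
  | 0 => s
  | k + 1 => canWinBashLoop k (canWinBashStep s)

def can_win_bash (n : Int) : Bool :=
  if n ≤ 3 then true
  else if n = 4 then false
  else (canWinBashLoop (n - 4).toNat (true, true, false)).2.2   -- win_lose_arr[-1]

-- ===== PORT B =====
def can_win_bash_alt (n : Int) : Bool :=
  decide (n ≤ 3) || decide (PySem.Int.mod n 4 ≠ 0)

-- ===== PRECONDITION & SPEC =====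
def Spec_can_win_bash (n : Int) (out : Bool) : Prop := out = can_win_bash_alt n
instance (n : Int) (out : Bool) : Decidable (Spec_can_win_bash n out) := by unfold Spec_can_win_bash; infer_instance

-- ===== CLAIM (what is proved, stated in full; the proofs are below) =====
def Claim_equal_can_win_bash : Prop := ∀ (n : Int), Dom_can_win_bash n → Spec_can_win_bash n (can_win_bash n)

-- ===== LEMMAS AND PROOFS =====
lemma canWinBashLoop_res (k : Nat) :
    (canWinBashLoop k (true, true, false)).2.2 = decide (k % 4 ≠ 0) := by
  induction k using Nat.strong_induction_on with
  | _ k ih =>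
    match k with
    | 0 => decide
    | 1 => decide
    | 2 => decide
    | 3 => decide
    | (k + 4) =>
      have h : canWinBashLoop (k + 4) (true, true, false)
             = canWinBashLoop k (true, true, false) := rfl
      rw [h, ih k (by omega)]
      have h4 : (k + 4) % 4 = k % 4 := by omega
      rw [h4]

-- ===== VERDICT (by name: the statement is the Claim_ definition above) =====
theorem can_win_bash_spec : Claim_equal_can_win_bash := by
  intro n _
  unfold Spec_can_win_bash can_win_bash can_win_bash_alt
  split_ifs with h1 h2
  · simp [h1]
  · subst h2; decide
  · rw [canWinBashLoop_res]
    have h5 : 5 ≤ n := by omega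
    have hmod : PySem.Int.mod n 4 = n % 4 :=
      PySem.Int.mod_eq_emod_of_pos (by omega)
    rw [hmod]
    have h3 : ¬ n ≤ 3 := by omega
    simp only [h3, decide_false, Bool.false_or]
    rw [decide_eq_decide]
    omega
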